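-- pv_equiv track=rewrite | github.com/pavle-potparic/python_exercises | DictAndSet/delete_set.py | remove_without_pop
-- ===== SOURCE A (Python) =====
-- def remove_without_pop(elements, remove_elemement):
--     remove_lista = []
--     if remove_elemement in elements:
--         for sacuvani_element in elements:
--             if remove_elemement == sacuvani_element:
--                 continue
--             else:
--                 remove_lista.append(sacuvani_element)
--         return remove_lista
--     else:
--         raise Exception
-- ===== SOURCE B (Python) =====
-- def remove_without_pop(elements, remove_elemement):
--     # count occurrences once, then delete that many first occurrences from a copy
--     occurrences = elements.count(remove_elemement)
--     if occurrences == 0: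
--         raise Exception
--     result = list(elements)
--     for _ in range(occurrences):
--         result.remove(remove_elemement)
--     return result
-- ===== Notes on version B (the rewrite author's own statement) =====
-- stated objective: alternative
-- what changed: Instead of a membership test followed by a filtering append-loop, B counts the occurrences of the target, raises if the count is zero, and then deletes exactly that many first occurrences from a copy of the list with list.remove.
import Mathlib
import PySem

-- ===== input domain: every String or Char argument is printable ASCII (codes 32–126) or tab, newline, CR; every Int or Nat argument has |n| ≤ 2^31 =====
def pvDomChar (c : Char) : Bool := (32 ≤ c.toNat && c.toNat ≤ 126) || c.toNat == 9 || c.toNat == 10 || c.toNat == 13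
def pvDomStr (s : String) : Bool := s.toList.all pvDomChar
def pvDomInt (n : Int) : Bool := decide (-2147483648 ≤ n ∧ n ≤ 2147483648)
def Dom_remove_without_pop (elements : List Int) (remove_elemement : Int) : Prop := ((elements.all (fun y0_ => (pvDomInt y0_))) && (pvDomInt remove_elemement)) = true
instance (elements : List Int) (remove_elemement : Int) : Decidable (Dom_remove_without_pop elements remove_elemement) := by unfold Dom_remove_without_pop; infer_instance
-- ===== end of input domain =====

-- B replaces A's membership-test-then-filter-loop by counting the occurrences and deleting
-- that many first occurrences from a copy with list.remove (alternative decomposition).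

-- ===== PORT A =====
-- Port of A: membership check, then an append loop skipping matches. Python raises a bare
-- Exception when remove_elemement is absent; Pre_ excludes that, [] here is unreachable.
def remove_without_pop (elements : List Int) (remove_elemement : Int) : List Int :=
  if elements.contains remove_elemement then
    elements.foldl (fun remove_lista x => if remove_elemement == x then remove_lista else remove_lista ++ [x]) []
  else []

-- ===== PORT B =====
-- Port of B: count, raise (excluded by Pre_) on zero, then `occurrences` iterations of
-- result.remove.  `.getD result` only makes the step total: inside the loop the element
-- is always present, so Python's remove never raises ValueError.
def remove_without_pop_alt (elements : List Int) (remove_elemement : Int) : List Int :=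
  let occurrences := PySem.List.count elements remove_elemement
  if occurrences == 0 then []
  else
    (PySem.List.pyRange 0 (occurrences : Int) 1).foldl
      (fun result _ => (PySem.List.remove? result remove_elemement).getD result) elements

-- ===== PRECONDITION & SPEC =====
-- Pre_ excludes inputs where remove_elemement is absent: there Python A (and B) raise a bare Exception.
def Pre_remove_without_pop (elements : List Int) (remove_elemement : Int) : Prop :=
  remove_elemement ∈ elements
instance (elements : List Int) (remove_elemement : Int) : Decidable (Pre_remove_without_pop elements remove_elemement) := by unfold Pre_remove_without_pop; infer_instance
def pvWitness_remove_without_pop : List Int × Int := ([1, 2, 3, 2], 2)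
def Spec_remove_without_pop (elements : List Int) (remove_elemement : Int) (out : List Int) : Prop := out = remove_without_pop_alt elements remove_elemement
instance (elements : List Int) (remove_elemement : Int) (out : List Int) : Decidable (Spec_remove_without_pop elements remove_elemement out) := by unfold Spec_remove_without_pop; infer_instance

-- ===== CLAIM (what is proved, stated in full; the proofs are below) =====
def Claim_equal_remove_without_pop : Prop := ∀ (elements : List Int) (remove_elemement : Int), Dom_remove_without_pop elements remove_elemement → Pre_remove_without_pop elements remove_elemement → Spec_remove_without_pop elements remove_elemement (remove_without_pop elements remove_elemement)

-- ===== LEMMAS AND PROOFS =====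
-- A's append loop builds acc ++ filter.
theorem a_fold_filter (r : Int) (xs : List Int) (acc : List Int) :
    xs.foldl (fun a x => if r == x then a else a ++ [x]) acc
      = acc ++ xs.filter (fun x => !(r == x)) := by
  induction xs generalizing acc with
  | nil => simp
  | cons y ys ih =>
      rw [List.foldl_cons]
      by_cases h : r = y
      · rw [if_pos (by simpa using h), ih, List.filter_cons]
        simp [h]
      · rw [if_neg (by simpa using h), ih, List.filter_cons]
        simp [h, Ne.symm h]

-- a fold that ignores the list elements is a function iterate
theorem foldl_const_iterate {α β : Type} (g : α → α) (l : List β) (x : α) :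
    l.foldl (fun s _ => g s) x = g^[l.length] x := by
  induction l generalizing x with
  | nil => rfl
  | cons y ys ih => simp [List.foldl_cons, ih, Function.iterate_succ_apply]

-- erasing the (absent-from-the-filter) value commutes with filtering
theorem filter_erase_self (r : Int) (xs : List Int) :
    (xs.erase r).filter (fun x => !(r == x)) = xs.filter (fun x => !(r == x)) := by
  induction xs with
  | nil => rfl
  | cons y ys ih =>
      by_cases h : y = r
      · subst h; simp [List.erase_cons_head]
      · rw [List.erase_cons_tail (by simpa using h)]
        simp [List.filter_cons, ih]

-- iterating `remove first occurrence` count-many times yields the filter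
theorem iterate_remove_eq_filter (r : Int) :
    ∀ (n : Nat) (xs : List Int), List.count r xs = n →
      (fun result => (PySem.List.remove? result r).getD result)^[n] xs
        = xs.filter (fun x => !(r == x)) := by
  intro n
  induction n with
  | zero =>
      intro xs h
      have hnot : r ∉ xs := by simpa using (List.count_eq_zero.mp h)
      simp only [Function.iterate_zero, id]
      symm
      apply List.filter_eq_self.mpr
      intro x hx
      simp only [Bool.not_eq_eq_eq_not, Bool.not_true, beq_eq_false_iff_ne]
      exact fun hrx => hnot (hrx ▸ hx)
  | succ n ih =>
      intro xs h
      have hmem : r ∈ xs := by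
        by_contra hc
        rw [List.count_eq_zero.mpr hc] at h; omega
      rw [Function.iterate_succ_apply]
      simp only [PySem.List.remove?_eq_some_erase xs r hmem, Option.getD_some]
      rw [ih (xs.erase r) (by rw [List.count_erase_self]; omega)]
      exact filter_erase_self r xs

-- ===== VERDICT (by name: the statement is the Claim_ definition above) =====
theorem remove_without_pop_spec : Claim_equal_remove_without_pop := by
  intro elements r _ hpre
  unfold Spec_remove_without_pop remove_without_pop remove_without_pop_alt
  have hmem : elements.contains r = true := by simpa using hpre
  rw [if_pos hmem, a_fold_filter]
  have hcnt : PySem.List.count elements r ≠ 0 := by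
    rw [PySem.List.count_eq]
    simpa [List.count_eq_zero] using hpre
  simp only [beq_iff_eq, if_neg hcnt]
  rw [foldl_const_iterate, PySem.List.length_pyRange_one]
  have : ((PySem.List.count elements r : Int) - 0).toNat = List.count r elements := by
    rw [PySem.List.count_eq]; omega
  rw [this, iterate_remove_eq_filter r _ elements rfl]
  simp
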